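-- pv_equiv track=rewrite | github.com/ariffazil/wealth | server.py | derive_verdict
-- ===== SOURCE A (Python) =====
-- from typing import Any, Dict, List, Optional
--
-- INVALID_FLAGS = {
--     "INVALID_INITIAL_INVESTMENT",
--     "INVALID_CASHFLOW_SERIES",
--     "INVALID_DISCOUNT_RATE",
--     "INVALID_FINANCE_RATE",
--     "INVALID_REINVESTMENT_RATE",
--     "INVALID_SCENARIOS",
--     "INVALID_SCENARIO",
--     "PROBABILITY_MASS_INVALID",
--     "INVALID_DEBT_SERVICE",
--     "INVALID_CFADS",
--     "INVALID_BASE_RATE",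
-- }
--
-- HOLD_FLAGS = {"LEVERAGE_CRITICAL", "LEVERAGE_DEFAULT", "SOVEREIGN_DIGNITY_LOW"}
--
-- QUALIFY_FLAGS = {
--     "NON_NORMAL_FLOWS",
--     "IRR_NOT_FOUND",
--     "NOT_RECOVERED",
--     "EBITDA_PROXY_USED",
-- }
--
-- def derive_verdict(flags: List[str], default_verdict: str = "SEAL") -> str:
--     if any(flag in INVALID_FLAGS for flag in flags):
--         return "VOID"
--     if any(flag in HOLD_FLAGS for flag in flags):
--         return "888-HOLD"
--     if any(flag in QUALIFY_FLAGS for flag in flags):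
--         return "QUALIFY"
--     return default_verdict
-- ===== SOURCE B (Python) =====
-- # B: one combined priority index + single min-rank pass (instead of three priority-ordered scans)
-- PRIORITY = {
--     "INVALID_INITIAL_INVESTMENT": 0,
--     "INVALID_CASHFLOW_SERIES": 0,
--     "INVALID_DISCOUNT_RATE": 0,
--     "INVALID_FINANCE_RATE": 0,
--     "INVALID_REINVESTMENT_RATE": 0,
--     "INVALID_SCENARIOS": 0,
--     "INVALID_SCENARIO": 0,
--     "PROBABILITY_MASS_INVALID": 0,
--     "INVALID_DEBT_SERVICE": 0,
--     "INVALID_CFADS": 0,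
--     "INVALID_BASE_RATE": 0,
--     "LEVERAGE_CRITICAL": 1,
--     "LEVERAGE_DEFAULT": 1,
--     "SOVEREIGN_DIGNITY_LOW": 1,
--     "NON_NORMAL_FLOWS": 2,
--     "IRR_NOT_FOUND": 2,
--     "NOT_RECOVERED": 2,
--     "EBITDA_PROXY_USED": 2,
-- }
--
-- VERDICTS = ("VOID", "888-HOLD", "QUALIFY")
--
-- def derive_verdict(flags, default_verdict="SEAL"):
--     best = None
--     for flag in flags:
--         r = PRIORITY.get(flag)
--         if r is not None and (best is None or r < best):
--             best = r
--     if best is None: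
--         return default_verdict
--     return VERDICTS[best]
-- ===== Notes on version B (the rewrite author's own statement) =====
-- stated objective: alternative
-- what changed: Replaced three priority-ordered any()/membership scans over separate flag sets by one combined flag->rank dictionary and a single pass that keeps the minimum rank seen, mapping the final rank to its verdict.
import Mathlib
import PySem

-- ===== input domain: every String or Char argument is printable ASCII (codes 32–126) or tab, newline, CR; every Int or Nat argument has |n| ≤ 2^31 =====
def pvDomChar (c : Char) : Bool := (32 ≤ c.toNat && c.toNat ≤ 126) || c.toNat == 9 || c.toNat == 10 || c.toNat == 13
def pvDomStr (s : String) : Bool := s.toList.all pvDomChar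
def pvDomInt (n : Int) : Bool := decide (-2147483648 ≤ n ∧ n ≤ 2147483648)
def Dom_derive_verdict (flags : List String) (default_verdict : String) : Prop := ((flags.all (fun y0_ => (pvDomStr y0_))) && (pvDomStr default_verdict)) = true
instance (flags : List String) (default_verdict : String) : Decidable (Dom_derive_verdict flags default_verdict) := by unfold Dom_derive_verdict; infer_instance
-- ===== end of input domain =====

-- B replaces A's three priority-ordered scans with one flag->rank index and a single min-rank pass (alternative decomposition; same semantics).

-- ===== PORT A =====
def INVALID_FLAGS : PySem.Set String := PySem.Set.ofList
  ["INVALID_INITIAL_INVESTMENT", "INVALID_CASHFLOW_SERIES", "INVALID_DISCOUNT_RATE",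
   "INVALID_FINANCE_RATE", "INVALID_REINVESTMENT_RATE", "INVALID_SCENARIOS",
   "INVALID_SCENARIO", "PROBABILITY_MASS_INVALID", "INVALID_DEBT_SERVICE",
   "INVALID_CFADS", "INVALID_BASE_RATE"]

def HOLD_FLAGS : PySem.Set String := PySem.Set.ofList
  ["LEVERAGE_CRITICAL", "LEVERAGE_DEFAULT", "SOVEREIGN_DIGNITY_LOW"]

def QUALIFY_FLAGS : PySem.Set String := PySem.Set.ofList
  ["NON_NORMAL_FLOWS", "IRR_NOT_FOUND", "NOT_RECOVERED", "EBITDA_PROXY_USED"]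

def derive_verdict (flags : List String) (default_verdict : String) : String :=
  if flags.any (fun flag => INVALID_FLAGS.contains flag) then "VOID"
  else if flags.any (fun flag => HOLD_FLAGS.contains flag) then "888-HOLD"
  else if flags.any (fun flag => QUALIFY_FLAGS.contains flag) then "QUALIFY"
  else default_verdict

-- ===== PORT B =====
def PRIORITY : PySem.Dict String Nat := PySem.Dict.ofList
  [("INVALID_INITIAL_INVESTMENT", 0), ("INVALID_CASHFLOW_SERIES", 0), ("INVALID_DISCOUNT_RATE", 0),
   ("INVALID_FINANCE_RATE", 0), ("INVALID_REINVESTMENT_RATE", 0), ("INVALID_SCENARIOS", 0),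
   ("INVALID_SCENARIO", 0), ("PROBABILITY_MASS_INVALID", 0), ("INVALID_DEBT_SERVICE", 0),
   ("INVALID_CFADS", 0), ("INVALID_BASE_RATE", 0),
   ("LEVERAGE_CRITICAL", 1), ("LEVERAGE_DEFAULT", 1), ("SOVEREIGN_DIGNITY_LOW", 1),
   ("NON_NORMAL_FLOWS", 2), ("IRR_NOT_FOUND", 2), ("NOT_RECOVERED", 2), ("EBITDA_PROXY_USED", 2)]

def VERDICTS : List String := ["VOID", "888-HOLD", "QUALIFY"]

def verdictStep (best : Option Nat) (flag : String) : Option Nat :=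
  match PRIORITY.get? flag with
  | none => best
  | some r =>
    match best with
    | none => some r
    | some b => if r < b then some r else some b

def derive_verdict_alt (flags : List String) (default_verdict : String) : String :=
  match flags.foldl verdictStep none with
  | none => default_verdict
  -- VERDICTS[best]: best is always a rank stored in PRIORITY (0, 1 or 2), so in range
  | some b => PySem.List.pyGetD VERDICTS (b : Int) default_verdict

-- ===== PRECONDITION & SPEC =====
def Spec_derive_verdict (flags : List String) (default_verdict : String) (out : String) : Prop := out = derive_verdict_alt flags default_verdict
instance (flags : List String) (default_verdict : String) (out : String) : Decidable (Spec_derive_verdict flags default_verdict out) := by unfold Spec_derive_verdict; infer_instance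

-- ===== CLAIM (what is proved, stated in full; the proofs are below) =====
def Claim_equal_derive_verdict : Prop := ∀ (flags : List String) (default_verdict : String), Dom_derive_verdict flags default_verdict → Spec_derive_verdict flags default_verdict (derive_verdict flags default_verdict)

-- ===== LEMMAS AND PROOFS =====

-- rank of a flag, expressed through A's three sets
def specRank (f : String) : Option Nat :=
  if INVALID_FLAGS.contains f then some 0
  else if HOLD_FLAGS.contains f then some 1
  else if QUALIFY_FLAGS.contains f then some 2
  else none

-- minimum over Option Nat
def omin : Option Nat → Option Nat → Option Nat
  | none, y => y
  | some b, none => some b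
  | some b, some r => some (min b r)

-- A's three-scan result as a rank
def specAll (flags : List String) : Option Nat :=
  if flags.any (fun flag => INVALID_FLAGS.contains flag) then some 0
  else if flags.any (fun flag => HOLD_FLAGS.contains flag) then some 1
  else if flags.any (fun flag => QUALIFY_FLAGS.contains flag) then some 2
  else none

def ALL_KEYS : List String :=
  ["INVALID_INITIAL_INVESTMENT", "INVALID_CASHFLOW_SERIES", "INVALID_DISCOUNT_RATE",
   "INVALID_FINANCE_RATE", "INVALID_REINVESTMENT_RATE", "INVALID_SCENARIOS",
   "INVALID_SCENARIO", "PROBABILITY_MASS_INVALID", "INVALID_DEBT_SERVICE",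
   "INVALID_CFADS", "INVALID_BASE_RATE",
   "LEVERAGE_CRITICAL", "LEVERAGE_DEFAULT", "SOVEREIGN_DIGNITY_LOW",
   "NON_NORMAL_FLOWS", "IRR_NOT_FOUND", "NOT_RECOVERED", "EBITDA_PROXY_USED"]

theorem get?_PRIORITY_eq (f : String) : PRIORITY.get? f = specRank f := by
  by_cases hf : f ∈ ALL_KEYS
  · fin_cases hf <;> decide
  · have hk : PRIORITY.keys = ALL_KEYS := by decide
    have h1 : PRIORITY.get? f = none := by
      rw [PySem.Dict.get?_eq_none_iff_not_mem_keys, hk]; exact hf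
    simp only [ALL_KEYS, List.mem_cons, List.not_mem_nil, or_false, not_or] at hf
    rw [h1]
    simp [specRank, INVALID_FLAGS, HOLD_FLAGS, QUALIFY_FLAGS, PySem.Set.ofList, hf]

theorem verdictStep_eq (b : Option Nat) (f : String) :
    verdictStep b f = omin b (specRank f) := by
  unfold verdictStep
  rw [get?_PRIORITY_eq]
  cases specRank f with
  | none => cases b <;> rfl
  | some r =>
    cases b with
    | none => rfl
    | some b' =>
      simp only [omin]
      rcases Nat.lt_or_ge r b' with h | h
      · rw [if_pos h, Nat.min_eq_right h.le]
      · rw [if_neg (Nat.not_lt.mpr h), Nat.min_eq_left h]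

theorem omin_assoc (a b c : Option Nat) : omin (omin a b) c = omin a (omin b c) := by
  cases a <;> cases b <;> cases c <;> simp [omin, Nat.min_assoc]

theorem specAll_cons (f : String) (fs : List String) :
    specAll (f :: fs) = omin (specRank f) (specAll fs) := by
  simp only [specAll, specRank, List.any_cons, Bool.or_eq_true]
  by_cases h1 : INVALID_FLAGS.contains f = true <;>
  by_cases h2 : HOLD_FLAGS.contains f = true <;>
  by_cases h3 : QUALIFY_FLAGS.contains f = true <;>
  by_cases g1 : (fs.any fun flag => INVALID_FLAGS.contains flag) = true <;>
  by_cases g2 : (fs.any fun flag => HOLD_FLAGS.contains flag) = true <;>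
  by_cases g3 : (fs.any fun flag => QUALIFY_FLAGS.contains flag) = true <;>
  simp only [h1, h2, h3, g1, g2, g3, true_or, or_true, if_true, omin] <;> rfl

theorem foldl_verdictStep_eq (flags : List String) :
    ∀ b, flags.foldl verdictStep b = omin b (specAll flags) := by
  induction flags with
  | nil => intro b; cases b <;> rfl
  | cons f fs ih =>
    intro b
    rw [List.foldl_cons, ih, verdictStep_eq, specAll_cons, omin_assoc]

-- ===== VERDICT (by name: the statement is the Claim_ definition above) =====
theorem derive_verdict_spec : Claim_equal_derive_verdict := by
  intro flags default_verdict _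
  unfold Spec_derive_verdict derive_verdict derive_verdict_alt
  rw [foldl_verdictStep_eq]
  unfold specAll
  split_ifs <;> simp [omin, VERDICTS] <;> rfl
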